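-- pv_equiv track=rewrite | github.com/timkavenki/hileldz | hilleldz9/task_4.py | fake_string
-- ===== SOURCE A (Python) =====
-- def fake_string(input_string, target_word, new_word, num_replacements):
--     words = input_string.split()
--     replaced_count = 0
--     result = []
--
--     for word in words:
--         if word == target_word and replaced_count < num_replacements:
--             result.append(new_word)
--             replaced_count += 1
--         else:
--             result.append(word)
--
--     return ' '.join(result)
-- ===== SOURCE B (Python) =====
-- def fake_string(input_string, target_word, new_word, num_replacements):
--     words = input_string.split()
--     idxs = [i for i, w in enumerate(words) if w == target_word]
--     k = num_replacements if num_replacements > 0 else 0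
--     to_replace = set(idxs[:k])
--     return ' '.join(new_word if i in to_replace else w
--                     for i, w in enumerate(words))
-- ===== Notes on version B (the rewrite author's own statement) =====
-- stated objective: alternative
-- what changed: Replaced the single interleaved count-and-replace loop by two passes: first collect the indices of the target word and keep the first num_replacements of them in a set, then map over the enumerated words replacing exactly those positions.
import Mathlib
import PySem

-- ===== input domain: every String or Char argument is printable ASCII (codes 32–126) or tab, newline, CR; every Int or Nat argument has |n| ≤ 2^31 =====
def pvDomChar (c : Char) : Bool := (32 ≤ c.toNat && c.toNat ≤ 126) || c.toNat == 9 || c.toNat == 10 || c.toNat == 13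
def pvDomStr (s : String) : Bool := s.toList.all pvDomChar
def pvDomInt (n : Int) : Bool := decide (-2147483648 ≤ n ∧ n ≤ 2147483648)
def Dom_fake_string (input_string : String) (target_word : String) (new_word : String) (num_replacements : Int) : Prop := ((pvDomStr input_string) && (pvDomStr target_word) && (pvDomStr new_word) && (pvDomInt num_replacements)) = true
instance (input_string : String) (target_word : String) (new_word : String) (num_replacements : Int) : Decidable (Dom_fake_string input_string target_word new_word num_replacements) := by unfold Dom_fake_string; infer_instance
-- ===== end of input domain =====

-- B replaces A's interleaved count-and-replace loop by two passes: gather the indices of the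
-- target word, keep the first num_replacements of them in a set, then map over the enumerated
-- words replacing exactly those positions (objective: alternative decomposition, same cost).

-- ===== PORT A =====
def fake_string (input_string : String) (target_word : String) (new_word : String) (num_replacements : Int) : String :=
  let words := PySem.Str.split₀ input_string
  let st := words.foldl (fun (st : Int × List String) word =>
      if word == target_word && decide (st.1 < num_replacements)
      then (st.1 + 1, st.2 ++ [new_word])
      else (st.1, st.2 ++ [word])) (0, [])
  PySem.Str.join " " st.2

-- ===== PORT B =====
def fake_string_alt (input_string : String) (target_word : String) (new_word : String) (num_replacements : Int) : String :=
  let words := PySem.Str.split₀ input_string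
  let idxs := ((PySem.List.enumerate words 0).filter (fun p => p.2 == target_word)).map (·.1)
  let k : Int := if num_replacements > 0 then num_replacements else 0
  let to_replace := PySem.Set.ofList (PySem.List.slice idxs none (some k))
  PySem.Str.join " " ((PySem.List.enumerate words 0).map
      (fun p => if PySem.Set.contains to_replace p.1 then new_word else p.2))

-- ===== CLAIM (what is proved, stated in full; the proofs are below) =====
def Spec_fake_string (input_string : String) (target_word : String) (new_word : String) (num_replacements : Int) (out : String) : Prop := out = fake_string_alt input_string target_word new_word num_replacements
instance (input_string : String) (target_word : String) (new_word : String) (num_replacements : Int) (out : String) : Decidable (Spec_fake_string input_string target_word new_word num_replacements out) := by unfold Spec_fake_string; infer_instance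

def Claim_equal_fake_string : Prop := ∀ (input_string : String) (target_word : String) (new_word : String) (num_replacements : Int), Dom_fake_string input_string target_word new_word num_replacements → Spec_fake_string input_string target_word new_word num_replacements (fake_string input_string target_word new_word num_replacements)

-- ===== LEMMAS AND PROOFS =====

-- A's loop, as a recursion on the remaining words with the running count c.
def pvARec (t nw : String) (n : Int) : List String → Int → List String
  | [], _ => []
  | w :: ws, c =>
      if w == t && decide (c < n) then nw :: pvARec t nw n ws (c + 1)
      else w :: pvARec t nw n ws c

-- the indices (starting at j) of the words equal to t
def pvOcc (t : String) : List String → Int → List Int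
  | [], _ => []
  | w :: ws, j => if w == t then j :: pvOcc t ws (j + 1) else pvOcc t ws (j + 1)

theorem pvOcc_ge (t : String) : ∀ (ws : List String) (j e : Int), e ∈ pvOcc t ws j → j ≤ e := by
  intro ws
  induction ws with
  | nil => intro j e h; simp [pvOcc] at h
  | cons w ws ih =>
      intro j e h
      simp only [pvOcc] at h
      split at h
      · rcases List.mem_cons.mp h with h | h
        · omega
        · have := ih (j + 1) e h; omega
      · have := ih (j + 1) e h; omega

theorem pvFoldlA (t nw : String) (n : Int) :
    ∀ (ws : List String) (c : Int) (acc : List String),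
    (ws.foldl (fun (st : Int × List String) word =>
        if word == t && decide (st.1 < n)
        then (st.1 + 1, st.2 ++ [nw])
        else (st.1, st.2 ++ [word])) (c, acc)).2 = acc ++ pvARec t nw n ws c := by
  intro ws
  induction ws with
  | nil => intro c acc; simp [pvARec]
  | cons w ws ih =>
      intro c acc
      simp only [List.foldl_cons]
      by_cases h : (w == t && decide (c < n)) = true
      · rw [if_pos h, ih]
        simp [pvARec, h]
      · rw [if_neg h, ih]
        simp [pvARec, h]

theorem pvOccFilter (t : String) :
    ∀ (ws : List String) (j : Int),
    ((PySem.List.enumerate ws j).filter (fun p => p.2 == t)).map (·.1) = pvOcc t ws j := by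
  intro ws
  induction ws with
  | nil => intro j; simp [pvOcc, PySem.List.enumerate_nil]
  | cons w ws ih =>
      intro j
      rw [PySem.List.enumerate_cons]
      by_cases h : (w == t) = true
      · simp [h, pvOcc, ih]
      · simp [h, pvOcc, ih]

-- B's mapping pass, when the replacement set is the first m occurrence indices,
-- equals a down-counting recursion; related to A's recursion below.
def pvBRec (t nw : String) : List String → Nat → List String
  | [], _ => []
  | w :: ws, m =>
      if w == t then
        (if 0 < m then nw :: pvBRec t nw ws (m - 1) else w :: pvBRec t nw ws 0)
      else w :: pvBRec t nw ws m

theorem pvMapTake (t nw : String) :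
    ∀ (ws : List String) (j : Int) (m : Nat),
    (PySem.List.enumerate ws j).map
        (fun p => if p.1 ∈ (pvOcc t ws j).take m then nw else p.2) = pvBRec t nw ws m := by
  intro ws
  induction ws with
  | nil => intro j m; simp [PySem.List.enumerate_nil, pvBRec]
  | cons w ws ih =>
      intro j m
      rw [PySem.List.enumerate_cons]
      by_cases h : (w == t) = true
      · have hocc : pvOcc t (w :: ws) j = j :: pvOcc t ws (j + 1) := by simp [pvOcc, h]
        rw [hocc]
        cases m with
        | zero =>
            have hb : pvBRec t nw (w :: ws) 0 = w :: pvBRec t nw ws 0 := by simp [pvBRec, h]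
            rw [hb, ← ih (j + 1) 0]
            simp
        | succ m' =>
            rw [List.take_succ_cons]
            have hb : pvBRec t nw (w :: ws) (m' + 1) = nw :: pvBRec t nw ws m' := by
              simp [pvBRec, h]
            rw [hb, List.map_cons]
            congr 1
            · simp
            · rw [← ih (j + 1) m']
              apply List.map_congr_left
              intro p hp
              rcases (PySem.List.mem_enumerate_iff _ _ _).mp hp with ⟨k, hk, rfl⟩
              have hne : ((j + 1 + (k : Int), ws[k]).1 : Int) ≠ j := by simp; omega
              simp only [List.mem_cons]
              simp [hne]
      · have hocc : pvOcc t (w :: ws) j = pvOcc t ws (j + 1) := by simp [pvOcc, h]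
        have hb : pvBRec t nw (w :: ws) m = w :: pvBRec t nw ws m := by simp [pvBRec, h]
        rw [hocc, hb, List.map_cons]
        congr 1
        · have hj : j ∉ (pvOcc t ws (j + 1)).take m := by
            intro hx
            have := pvOcc_ge t ws (j + 1) j (List.mem_of_mem_take hx)
            omega
          simp [hj]
        · exact ih (j + 1) m

theorem pvAB (t nw : String) (n : Int) :
    ∀ (ws : List String) (c : Int), pvARec t nw n ws c = pvBRec t nw ws (n - c).toNat := by
  intro ws
  induction ws with
  | nil => intro c; simp [pvARec, pvBRec]
  | cons w ws ih =>
      intro c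
      by_cases h : (w == t) = true
      · by_cases hc : c < n
        · have h1 : pvARec t nw n (w :: ws) c = nw :: pvARec t nw n ws (c + 1) := by
            simp [pvARec, h, hc]
          have hm : 0 < (n - c).toNat := by omega
          have h2 : pvBRec t nw (w :: ws) (n - c).toNat = nw :: pvBRec t nw ws ((n - c).toNat - 1) := by
            simp [pvBRec, h, hm]
          have h3 : (n - c).toNat - 1 = (n - (c + 1)).toNat := by omega
          rw [h1, h2, h3, ih]
        · have hm : (n - c).toNat = 0 := by omega
          have h1 : pvARec t nw n (w :: ws) c = w :: pvARec t nw n ws c := by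
            simp [pvARec, h, hc]
          have h2 : pvBRec t nw (w :: ws) (n - c).toNat = w :: pvBRec t nw ws 0 := by
            simp [pvBRec, h, hm]
          rw [h1, h2, ih, hm]
      · have h1 : pvARec t nw n (w :: ws) c = w :: pvARec t nw n ws c := by simp [pvARec, h]
        have h2 : pvBRec t nw (w :: ws) (n - c).toNat = w :: pvBRec t nw ws (n - c).toNat := by
          simp [pvBRec, h]
        rw [h1, h2, ih]

-- ===== VERDICT (by name: the statement is the Claim_ definition above) =====
theorem fake_string_spec : Claim_equal_fake_string := by
  intro s t nw n _
  unfold Spec_fake_string fake_string fake_string_alt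
  dsimp only
  generalize PySem.Str.split₀ s = ws
  rw [pvFoldlA t nw n ws 0 [], List.nil_append, pvOccFilter t ws 0]
  have hk : (if n > 0 then n else 0) ≥ 0 := by split <;> omega
  rw [PySem.List.slice_to]
  have hkt : (if n > 0 then n else 0).toNat = n.toNat := by split <;> omega
  rw [hkt]
  have hfun : ((PySem.List.enumerate ws 0).map
      (fun p => if PySem.Set.contains (PySem.Set.ofList ((pvOcc t ws 0).take n.toNat)) p.1
                then nw else p.2)) =
      ((PySem.List.enumerate ws 0).map
      (fun p => if p.1 ∈ (pvOcc t ws 0).take n.toNat then nw else p.2)) := by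
    apply List.map_congr_left
    intro p _
    by_cases hx : p.1 ∈ (pvOcc t ws 0).take n.toNat
    · simp [PySem.Set.mem_ofList, hx]
    · simp [PySem.Set.mem_ofList, hx]
  rw [hfun, pvMapTake t nw ws 0 n.toNat]
  have := pvAB t nw n ws 0
  simp only [Int.sub_zero] at this
  rw [this]
  exact hk
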